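-- pv_equiv track=rewrite | github.com/whillx/Movie-Cards-Generator | core/image_generator.py | _split_font_name
-- ===== SOURCE A (Python) =====
-- _BOLD_KEYWORDS   = {'bold', 'black', 'heavy', 'extrabold', 'demibold', 'semibold'}
--
-- _ITALIC_KEYWORDS = {'italic', 'oblique', 'slanted'}
--
-- def _split_font_name(font_name: str):
--     """
--     Split a font family name into (base_name, bold, italic).
--
--     e.g. "Arial Bold Italic" → ("Arial", True, True)
--          "Arial"             → ("Arial", False, False)
--     """
--     words, base, is_bold, is_italic = font_name.split(), [], False, False
--     for w in words:
--         wl = w.lower()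
--         if wl in _BOLD_KEYWORDS:
--             is_bold = True
--         elif wl in _ITALIC_KEYWORDS:
--             is_italic = True
--         else:
--             base.append(w)
--     return (' '.join(base) if base else font_name), is_bold, is_italic
-- ===== SOURCE B (Python) =====
-- _BOLD_KEYWORDS   = {'bold', 'black', 'heavy', 'extrabold', 'demibold', 'semibold'}
--
-- _ITALIC_KEYWORDS = {'italic', 'oblique', 'slanted'}
--
-- def _split_font_name(font_name: str):
--     """Split a font family name into (base_name, bold, italic) via three independent passes."""
--     words = font_name.split()
--     is_bold = any(w.lower() in _BOLD_KEYWORDS for w in words)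
--     is_italic = any(w.lower() in _ITALIC_KEYWORDS for w in words)
--     base = [w for w in words
--             if w.lower() not in _BOLD_KEYWORDS and w.lower() not in _ITALIC_KEYWORDS]
--     return (' '.join(base) if base else font_name), is_bold, is_italic
-- ===== Notes on version B (the rewrite author's own statement) =====
-- stated objective: simpler
-- what changed: Replaces the single fused loop with mutable flags and an accumulator by three independent declarative passes: two any() scans for the flags and one comprehension for the base words.
import Mathlib
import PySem

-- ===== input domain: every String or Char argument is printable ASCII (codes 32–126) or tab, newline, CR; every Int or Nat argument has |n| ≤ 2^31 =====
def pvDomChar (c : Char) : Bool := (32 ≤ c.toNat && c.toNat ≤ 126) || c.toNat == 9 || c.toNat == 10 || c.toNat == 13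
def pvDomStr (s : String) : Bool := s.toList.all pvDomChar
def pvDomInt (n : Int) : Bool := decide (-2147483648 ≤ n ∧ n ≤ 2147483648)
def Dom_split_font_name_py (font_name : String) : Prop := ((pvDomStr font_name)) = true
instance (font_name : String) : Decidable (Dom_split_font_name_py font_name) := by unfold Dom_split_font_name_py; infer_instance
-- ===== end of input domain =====

-- B replaces A's single fused loop by three independent passes (two any-scans and a filter); same values, no speed claim.

-- ===== PORT A =====
def pvBoldKw : List String := ["bold", "black", "heavy", "extrabold", "demibold", "semibold"]
def pvItalicKw : List String := ["italic", "oblique", "slanted"]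

-- A's loop body: one step over state (base, is_bold, is_italic)
def pvStepA (acc : List String × Bool × Bool) (w : String) : List String × Bool × Bool :=
  let wl := PySem.Str.lower w
  if pvBoldKw.contains wl then (acc.1, true, acc.2.2)
  else if pvItalicKw.contains wl then (acc.1, acc.2.1, true)
  else (acc.1 ++ [w], acc.2.1, acc.2.2)

def split_font_name_py (font_name : String) : String × Bool × Bool :=
  let words := PySem.Str.split₀ font_name
  let st := words.foldl pvStepA ([], false, false)
  ((if st.1 ≠ [] then PySem.Str.join " " st.1 else font_name), st.2.1, st.2.2)

-- ===== PORT B =====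
def split_font_name_py_alt (font_name : String) : String × Bool × Bool :=
  let words := PySem.Str.split₀ font_name
  let isBold := words.any (fun w => pvBoldKw.contains (PySem.Str.lower w))
  let isItalic := words.any (fun w => pvItalicKw.contains (PySem.Str.lower w))
  let base := words.filter
    (fun w => !pvBoldKw.contains (PySem.Str.lower w) && !pvItalicKw.contains (PySem.Str.lower w))
  ((if base ≠ [] then PySem.Str.join " " base else font_name), isBold, isItalic)

-- ===== PRECONDITION & SPEC =====
def Spec_split_font_name_py (font_name : String) (out : String × Bool × Bool) : Prop := out = split_font_name_py_alt font_name
instance (font_name : String) (out : String × Bool × Bool) : Decidable (Spec_split_font_name_py font_name out) := by unfold Spec_split_font_name_py; infer_instance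

-- ===== CLAIM (what is proved, stated in full; the proofs are below) =====
def Claim_equal_split_font_name_py : Prop := ∀ (font_name : String), Dom_split_font_name_py font_name → Spec_split_font_name_py font_name (split_font_name_py font_name)

-- ===== LEMMAS AND PROOFS =====

-- the two keyword sets are disjoint
lemma pv_disjoint (s : String) (h : s ∈ pvBoldKw) : s ∉ pvItalicKw := by
  simp [pvBoldKw] at h
  rcases h with h | h | h | h | h | h <;> subst h <;> decide

-- A's fold, started from any state, yields B's three passes
lemma pv_fold_eq (ws : List String) (b : List String) (bd it : Bool) :
    ws.foldl pvStepA (b, bd, it) =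
      (b ++ ws.filter (fun w => !pvBoldKw.contains (PySem.Str.lower w) && !pvItalicKw.contains (PySem.Str.lower w)),
       bd || ws.any (fun w => pvBoldKw.contains (PySem.Str.lower w)),
       it || ws.any (fun w => pvItalicKw.contains (PySem.Str.lower w))) := by
  induction ws generalizing b bd it with
  | nil => simp
  | cons w ws ih =>
    by_cases hb : PySem.Str.lower w ∈ pvBoldKw
    · have hi := pv_disjoint _ hb
      simp [pvStepA, hb, hi, ih]
    · by_cases hi : PySem.Str.lower w ∈ pvItalicKw
      · simp [pvStepA, hb, hi, ih]
      · simp [pvStepA, hb, hi, ih]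

-- ===== VERDICT (by name: the statement is the Claim_ definition above) =====
theorem split_font_name_py_spec : Claim_equal_split_font_name_py := by
  intro font_name _
  unfold Spec_split_font_name_py split_font_name_py split_font_name_py_alt
  simp [pv_fold_eq]
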